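-- pv_equiv track=rewrite | github.com/TypeOracle/TypeOracleIntermediateResults | Accuracy/TypeOracle/foxit reader/utility/cmp_arg.py | output_missing
-- ===== SOURCE A (Python) =====
-- def count_in_list(alist, target):
--     res = 0
--     for i in alist:
--         if i in target:
--             res += 1
--     return res
--
-- def output_missing(alist):
--     content = ''
--     if '0' in alist:
--         tmp = count_in_list(alist, '0')
--         content += '- missing %d Boolean\n' % (tmp)
--     if '1' in alist:
--         tmp = count_in_list(alist, '1')
--         content += '- missing %d Number\n' % (tmp)
--     if '3' in alist:
--         tmp = count_in_list(alist, '3')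
--         content += '- missing %d String\n' % (tmp)
--     array_num = 0
--     json_num = 0
--     for i in alist:
--         if i.startswith('22'):
--             array_num += 1
--         if i.startswith('23'):
--             json_num += 1
--     if array_num != 0:
--         content += '- missing %d Array\n' % (array_num)
--     if json_num != 0:
--         content += '- missing %d Object\n' % (json_num)
--     return content
-- ===== SOURCE B (Python) =====
-- def output_missing(alist):
--     bools = nums = strs = arrays = objects = 0
--     for x in alist:
--         if x == '0':
--             bools += 1
--         elif x == '1':
--             nums += 1
--         elif x == '3':
--             strs += 1
--         elif x.startswith('22'):
--             arrays += 1
--         elif x.startswith('23'):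
--             objects += 1
--     content = ''
--     if bools:
--         content += '- missing %d Boolean\n' % bools
--     if nums:
--         content += '- missing %d Number\n' % nums
--     if strs:
--         content += '- missing %d String\n' % strs
--     if arrays:
--         content += '- missing %d Array\n' % arrays
--     if objects:
--         content += '- missing %d Object\n' % objects
--     return content
-- ===== Notes on version B (the rewrite author's own statement) =====
-- stated objective: simpler
-- what changed: One fused pass with an if/elif chain keeping five exact counters replaces A's three separate substring-membership counting scans plus a fourth prefix-scanning loop; the output is assembled once from the counters.
-- intended difference: On lists containing the empty string together with at least one of '0','1','3', A adds the number of empty strings to each printed digit count (its membership test `i in '0'` is a substring test that '' always passes), while B prints the exact number of occurrences of the digit, which is the intended count of missing entries of that type. — e.g. on output_missing(["", "0"]): A returns "- missing 2 Boolean\n", B returns "- missing 1 Boolean\n"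
import Mathlib
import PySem

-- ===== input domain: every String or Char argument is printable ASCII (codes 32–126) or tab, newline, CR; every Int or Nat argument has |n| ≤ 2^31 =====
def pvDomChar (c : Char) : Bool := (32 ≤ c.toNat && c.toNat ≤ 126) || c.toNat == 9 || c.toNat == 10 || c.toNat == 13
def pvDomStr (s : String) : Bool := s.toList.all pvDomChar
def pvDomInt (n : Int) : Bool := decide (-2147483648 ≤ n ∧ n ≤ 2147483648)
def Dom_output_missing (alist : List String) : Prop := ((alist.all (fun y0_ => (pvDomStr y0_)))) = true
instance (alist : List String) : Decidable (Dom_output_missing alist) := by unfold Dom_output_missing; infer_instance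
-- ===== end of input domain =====

-- B replaces A's three substring-counting scans plus a prefix loop by ONE fused pass with five
-- exact counters (simpler/alternative); B counts exact digit matches, so on lists holding '' next
-- to a digit (D_ below) it prints the intended exact counts where A's substring test overcounts.

-- ===== PORT A =====
def count_in_list (alist : List String) (target : String) : Int :=
  alist.foldl (fun res i => if PySem.Str.isIn i target then res + 1 else res) 0

def output_missing (alist : List String) : String :=
  let content := ""
  let content := if "0" ∈ alist then
      content ++ "- missing " ++ PySem.Int.toStr (count_in_list alist "0") ++ " Boolean\n" else content
  let content := if "1" ∈ alist then
      content ++ "- missing " ++ PySem.Int.toStr (count_in_list alist "1") ++ " Number\n" else content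
  let content := if "3" ∈ alist then
      content ++ "- missing " ++ PySem.Int.toStr (count_in_list alist "3") ++ " String\n" else content
  let aj := alist.foldl (fun (p : Int × Int) i =>
      (if PySem.Str.startswith i "22" then p.1 + 1 else p.1,
       if PySem.Str.startswith i "23" then p.2 + 1 else p.2)) (0, 0)
  let content := if aj.1 ≠ 0 then content ++ "- missing " ++ PySem.Int.toStr aj.1 ++ " Array\n" else content
  let content := if aj.2 ≠ 0 then content ++ "- missing " ++ PySem.Int.toStr aj.2 ++ " Object\n" else content
  content

-- ===== PORT B =====
def altCounts (alist : List String) : Int × Int × Int × Int × Int :=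
  alist.foldl (fun s x =>
    if x == "0" then (s.1 + 1, s.2.1, s.2.2.1, s.2.2.2.1, s.2.2.2.2)
    else if x == "1" then (s.1, s.2.1 + 1, s.2.2.1, s.2.2.2.1, s.2.2.2.2)
    else if x == "3" then (s.1, s.2.1, s.2.2.1 + 1, s.2.2.2.1, s.2.2.2.2)
    else if PySem.Str.startswith x "22" then (s.1, s.2.1, s.2.2.1, s.2.2.2.1 + 1, s.2.2.2.2)
    else if PySem.Str.startswith x "23" then (s.1, s.2.1, s.2.2.1, s.2.2.2.1, s.2.2.2.2 + 1)
    else s) (0, 0, 0, 0, 0)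

def output_missing_alt (alist : List String) : String :=
  let c := altCounts alist
  let content := ""
  let content := if c.1 ≠ 0 then content ++ "- missing " ++ PySem.Int.toStr c.1 ++ " Boolean\n" else content
  let content := if c.2.1 ≠ 0 then content ++ "- missing " ++ PySem.Int.toStr c.2.1 ++ " Number\n" else content
  let content := if c.2.2.1 ≠ 0 then content ++ "- missing " ++ PySem.Int.toStr c.2.2.1 ++ " String\n" else content
  let content := if c.2.2.2.1 ≠ 0 then content ++ "- missing " ++ PySem.Int.toStr c.2.2.2.1 ++ " Array\n" else content
  let content := if c.2.2.2.2 ≠ 0 then content ++ "- missing " ++ PySem.Int.toStr c.2.2.2.2 ++ " Object\n" else content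
  content

-- ===== PRECONDITION & SPEC =====
-- On lists containing '' together with one of '0','1','3', A's substring test `i in '0'` counts
-- every '' into each printed digit count, while B prints the exact number of occurrences of the
-- digit, which is the intended count of missing entries.
def D_output_missing (alist : List String) : Prop :=
  "" ∈ alist ∧ ("0" ∈ alist ∨ "1" ∈ alist ∨ "3" ∈ alist)
instance (alist : List String) : Decidable (D_output_missing alist) := by
  unfold D_output_missing; infer_instance

def Spec_output_missing (alist : List String) (out : String) : Prop :=
  ¬ D_output_missing alist → out = output_missing_alt alist
instance (alist : List String) (out : String) : Decidable (Spec_output_missing alist out) := by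
  unfold Spec_output_missing; infer_instance

def pvDiffWitness_output_missing : List String := ["", "0"]
def pvDiffWitnessOut_output_missing : String × String :=
  ("- missing 2 Boolean\n", "- missing 1 Boolean\n")

-- ===== CLAIM (what is proved, stated in full; the proofs are below) =====
def Claim_unchanged_output_missing : Prop :=
  ∀ (alist : List String), Dom_output_missing alist → Spec_output_missing alist (output_missing alist)
def Claim_changed_output_missing : Prop :=
  Dom_output_missing (pvDiffWitness_output_missing) ∧ D_output_missing (pvDiffWitness_output_missing) ∧
  output_missing (pvDiffWitness_output_missing) = pvDiffWitnessOut_output_missing.1 ∧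
  output_missing_alt (pvDiffWitness_output_missing) = pvDiffWitnessOut_output_missing.2 ∧
  pvDiffWitnessOut_output_missing.1 ≠ pvDiffWitnessOut_output_missing.2

-- ===== LEMMAS AND PROOFS =====

-- common normal form: the output as a function of the five exact counts
def render (b n s a j : Int) : String :=
  (if b ≠ 0 then "" ++ "- missing " ++ PySem.Int.toStr b ++ " Boolean\n" else "") |>
  (fun c => if n ≠ 0 then c ++ "- missing " ++ PySem.Int.toStr n ++ " Number\n" else c) |>
  (fun c => if s ≠ 0 then c ++ "- missing " ++ PySem.Int.toStr s ++ " String\n" else c) |>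
  (fun c => if a ≠ 0 then c ++ "- missing " ++ PySem.Int.toStr a ++ " Array\n" else c) |>
  (fun c => if j ≠ 0 then c ++ "- missing " ++ PySem.Int.toStr j ++ " Object\n" else c)

lemma altCounts_loop (l : List String) (b n s a j : Int) :
    l.foldl (fun s x =>
      if x == "0" then (s.1 + 1, s.2.1, s.2.2.1, s.2.2.2.1, s.2.2.2.2)
      else if x == "1" then (s.1, s.2.1 + 1, s.2.2.1, s.2.2.2.1, s.2.2.2.2)
      else if x == "3" then (s.1, s.2.1, s.2.2.1 + 1, s.2.2.2.1, s.2.2.2.2)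
      else if PySem.Str.startswith x "22" then (s.1, s.2.1, s.2.2.1, s.2.2.2.1 + 1, s.2.2.2.2)
      else if PySem.Str.startswith x "23" then (s.1, s.2.1, s.2.2.1, s.2.2.2.1, s.2.2.2.2 + 1)
      else s) (b, n, s, a, j)
    = (b + l.count "0", n + l.count "1", s + l.count "3",
       a + (l.countP (fun x => PySem.Str.startswith x "22") : Int),
       j + (l.countP (fun x => PySem.Str.startswith x "23") : Int)) := by
  induction l generalizing b n s a j with
  | nil => simp
  | cons x t ih =>
    simp only [List.foldl_cons, List.count_cons, List.countP_cons]
    by_cases h0 : x = "0"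
    · subst h0; rw [ih]; simp; ring
    · by_cases h1 : x = "1"
      · subst h1; rw [if_neg (by simp), ih]; simp; ring
      · by_cases h3 : x = "3"
        · subst h3; rw [if_neg (by simp), if_neg (by simp), ih]; simp
          ring
        · rw [if_neg (by simpa using h0), if_neg (by simpa using h1), if_neg (by simpa using h3)]
          by_cases h22 : PySem.Str.startswith x "22" = true
          · have h22c : PySem.Chars.startswith x.toList ['2', '2'] = true := by simpa using h22
            have h23c : PySem.Chars.startswith x.toList ['2', '3'] = false := by
              by_contra hc
              rw [Bool.not_eq_false] at hc
              obtain ⟨t1, e1⟩ := (PySem.Chars.startswith_iff _ _).mp h22c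
              obtain ⟨t2, e2⟩ := (PySem.Chars.startswith_iff _ _).mp hc
              rw [← e1] at e2
              simp at e2
            rw [if_pos h22, ih]
            simp [h0, h1, h3, h22c, h23c]
            ring
          · have h22c : PySem.Chars.startswith x.toList ['2', '2'] = false := by
              simpa using h22
            by_cases h23 : PySem.Str.startswith x "23" = true
            · have h23c : PySem.Chars.startswith x.toList ['2', '3'] = true := by simpa using h23
              rw [if_neg h22, if_pos h23, ih]
              simp [h0, h1, h3, h22c, h23c]
              ring
            · have h23c : PySem.Chars.startswith x.toList ['2', '3'] = false := by
                simpa using h23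
              rw [if_neg h22, if_neg h23, ih]
              simp [h0, h1, h3, h22c, h23c]

lemma alt_eq_render (alist : List String) :
    output_missing_alt alist =
      render (alist.count "0") (alist.count "1") (alist.count "3")
        (alist.countP (fun x => PySem.Str.startswith x "22"))
        (alist.countP (fun x => PySem.Str.startswith x "23")) := by
  unfold output_missing_alt altCounts render
  rw [altCounts_loop]
  simp

lemma isIn_single (x t : String) (c : Char) (ht : t.toList = [c]) :
    PySem.Str.isIn x t = true ↔ x = "" ∨ x = t := by
  rw [PySem.Str.isIn_iff_infix, ht]
  constructor
  · intro h
    rcases List.sublist_singleton.mp h.sublist with h' | h'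
    · left; exact String.toList_inj.mp (by simpa using h')
    · right; exact String.toList_inj.mp (by rw [ht]; exact h')
  · rintro (h | h) <;> subst h
    · simp
    · rw [ht]

lemma count_in_list_eq (alist : List String) (t : String) (c : Char)
    (ht : t.toList = [c]) (hE : "" ∉ alist) :
    count_in_list alist t = (alist.count t : Int) := by
  unfold count_in_list
  rw [PySem.List.foldl_if_add_one]
  have : alist.countP (fun i => PySem.Str.isIn i t) = alist.count t := by
    rw [List.count_eq_countP]
    apply List.countP_congr
    intro x hx
    have hxe : x ≠ "" := fun h => hE (h ▸ hx)
    by_cases hxt : x = t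
    · have h1 : PySem.Str.isIn x t = true := (isIn_single x t c ht).mpr (Or.inr hxt)
      simp [hxt]
      simpa [hxt] using h1
    · have h1 : PySem.Str.isIn x t = false := by
        cases hval : PySem.Str.isIn x t
        · rfl
        · rcases (isIn_single x t c ht).mp hval with h' | h'
          · exact absurd h' hxe
          · exact absurd h' hxt
      simp [hxt]
      simpa using h1
  rw [this]; ring

lemma aj_loop_gen (l : List String) (a j : Int) :
    l.foldl (fun (p : Int × Int) i =>
      (if PySem.Chars.startswith i.toList ['2', '2'] = true then p.1 + 1 else p.1,
       if PySem.Chars.startswith i.toList ['2', '3'] = true then p.2 + 1 else p.2)) (a, j)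
    = (a + (l.countP (fun x => PySem.Chars.startswith x.toList ['2', '2']) : Int),
       j + (l.countP (fun x => PySem.Chars.startswith x.toList ['2', '3']) : Int)) := by
  induction l generalizing a j with
  | nil => simp
  | cons x t ih =>
    simp only [List.foldl_cons, List.countP_cons]
    rw [ih]
    by_cases h22 : PySem.Chars.startswith x.toList ['2', '2'] = true <;>
      by_cases h23 : PySem.Chars.startswith x.toList ['2', '3'] = true <;>
        simp [h22, h23]
    all_goals try constructor
    all_goals ring

lemma aj_loop (alist : List String) :
    alist.foldl (fun (p : Int × Int) i =>
      (if PySem.Str.startswith i "22" then p.1 + 1 else p.1,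
       if PySem.Str.startswith i "23" then p.2 + 1 else p.2)) (0, 0)
    = ((alist.countP (fun x => PySem.Str.startswith x "22") : Int),
       (alist.countP (fun x => PySem.Str.startswith x "23") : Int)) := by
  have h := aj_loop_gen alist 0 0
  simpa using h

lemma mem_iff_count_ne (alist : List String) (v : String) :
    v ∈ alist ↔ (alist.count v : Int) ≠ 0 := by
  rw [← List.count_pos_iff]
  omega

-- ===== VERDICT (by name: the statement is the Claim_ definition above) =====
theorem output_missing_spec : Claim_unchanged_output_missing := by
  intro alist _ hnD
  rw [alt_eq_render]
  unfold D_output_missing at hnD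
  push_neg at hnD
  by_cases hE : "" ∈ alist
  · -- no digit is present: every digit section is skipped on both sides
    obtain ⟨h0, h1, h3⟩ := hnD hE
    simp only [output_missing]
    rw [aj_loop, if_neg h0, if_neg h1, if_neg h3]
    unfold render
    rw [List.count_eq_zero_of_not_mem h0, List.count_eq_zero_of_not_mem h1,
        List.count_eq_zero_of_not_mem h3]
    simp
  · -- no '' present: A's substring counts coincide with the exact counts
    have e0 := count_in_list_eq alist "0" '0' rfl hE
    have e1 := count_in_list_eq alist "1" '1' rfl hE
    have e3 := count_in_list_eq alist "3" '3' rfl hE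
    simp only [output_missing]
    rw [aj_loop, e0, e1, e3]
    unfold render
    simp only [mem_iff_count_ne]

theorem output_missing_changed : Claim_changed_output_missing := by
  unfold Claim_changed_output_missing; decide
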